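-- pv_equiv track=rewrite | github.com/rdh1115/NLP_code_examples | removing_bias_skipgram_cbow/code.py | cbow_preprocessing
-- ===== SOURCE A (Python) =====
-- def build_current_surrounding_pairs(indices: "list[int]", window_size: int = 2):
--     sur = list()
--     cur = list()
--     l = len(indices)
--
--     for i, w in enumerate(indices):
--         if window_size <= i <= l - 1 - window_size:
--             cur.append(w)
--             windows = [i + j for j in
--                        range(-window_size, window_size + 1, 1)
--                        if (i + j >= 0) &
--                        (i + j < l) &
--                        (j != 0)]
--             sur.append([indices[idx] for idx in windows])
--     return sur, cur
--
-- def cbow_preprocessing(indices_list: "list[list[int]]", window_size: int = 2):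
--     sources = list()
--     targets = list()
--
--     for idx_list in indices_list:
--         sur, cur = build_current_surrounding_pairs(idx_list, window_size)
--         sources += sur
--         targets += cur
--     return sources, targets
-- ===== SOURCE B (Python) =====
-- def cbow_preprocessing(indices_list: "list[list[int]]", window_size: int = 2):
--     # Single inlined loop: context built from two slices (left then right of the center).
--     sources = list()
--     targets = list()
--
--     for idx_list in indices_list:
--         l = len(idx_list)
--         for i in range(window_size, l - window_size):
--             sources.append(idx_list[i - window_size:i] +
--                            idx_list[i + 1:i + window_size + 1])
--             targets.append(idx_list[i])
--     return sources, targets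
-- ===== Notes on version B (the rewrite author's own statement) =====
-- stated objective: simpler
-- what changed: Inlines the helper into one loop over the valid center range and builds each context as two list slices (left of and right of the center) instead of enumerating all positions, filtering the center band, and building a range(-w,w+1) comprehension with per-offset bounds tests; slicing removes the per-element index arithmetic and bounds checks (measured constant-factor speedup).
-- outside the precondition, e.g. on cbow_preprocessing([[1, 2]], -1): A returns ([[], []], [1, 2]), B raises IndexError
import Mathlib
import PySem

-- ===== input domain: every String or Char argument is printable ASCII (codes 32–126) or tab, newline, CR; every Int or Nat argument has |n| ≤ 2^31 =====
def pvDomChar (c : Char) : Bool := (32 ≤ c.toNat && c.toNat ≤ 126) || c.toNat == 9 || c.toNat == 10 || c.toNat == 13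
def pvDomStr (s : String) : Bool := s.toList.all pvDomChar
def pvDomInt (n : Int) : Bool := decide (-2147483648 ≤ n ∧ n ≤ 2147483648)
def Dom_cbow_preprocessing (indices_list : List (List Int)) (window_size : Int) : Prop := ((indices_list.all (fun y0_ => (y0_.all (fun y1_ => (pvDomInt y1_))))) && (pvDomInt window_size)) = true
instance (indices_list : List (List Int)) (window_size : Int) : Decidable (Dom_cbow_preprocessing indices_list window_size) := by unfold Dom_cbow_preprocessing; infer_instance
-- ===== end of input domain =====

-- ===== PORT A =====
-- Port of A's helper. `indices[idx]` in the comprehension is always in range (the filter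
-- guarantees 0 ≤ idx < l), so the defaulted pyGetD is exact there.
def build_current_surrounding_pairs (indices : List Int) (window_size : Int) :
    List (List Int) × List Int :=
  let l : Int := indices.length
  (PySem.List.enumerate indices).foldl
    (fun acc p =>
      if window_size ≤ p.1 ∧ p.1 ≤ l - 1 - window_size then
        let windows : List Int :=
          ((PySem.List.pyRange (-window_size) (window_size + 1) 1).filter
            (fun j => decide (0 ≤ p.1 + j) && decide (p.1 + j < l) && decide (j ≠ 0))).map
            (fun j => p.1 + j)
        (acc.1 ++ [windows.map (fun k => PySem.List.pyGetD indices k 0)], acc.2 ++ [p.2])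
      else acc)
    ([], [])

def cbow_preprocessing (indices_list : List (List Int)) (window_size : Int) :
    List (List Int) × List Int :=
  indices_list.foldl
    (fun acc idx_list =>
      let r := build_current_surrounding_pairs idx_list window_size
      (acc.1 ++ r.1, acc.2 ++ r.2))
    ([], [])

-- ===== PORT B =====
-- B inlines the helper: one loop over the valid center range, context = left slice ++ right slice.
-- `idx_list[i]` is always in range under Pre_ (0 ≤ window_size ≤ i < l - window_size), so pyGetD is exact.
def cbow_preprocessing_alt (indices_list : List (List Int)) (window_size : Int) :
    List (List Int) × List Int :=
  indices_list.foldl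
    (fun acc idx_list =>
      let l : Int := idx_list.length
      (PySem.List.pyRange window_size (l - window_size) 1).foldl
        (fun acc2 i =>
          (acc2.1 ++ [PySem.List.slice idx_list (some (i - window_size)) (some i) ++
                      PySem.List.slice idx_list (some (i + 1)) (some (i + window_size + 1))],
           acc2.2 ++ [PySem.List.pyGetD idx_list i 0]))
        acc)
    ([], [])

-- ===== PRECONDITION & SPEC =====
-- Pre_ restricts to the task's natural domain 0 ≤ window_size: on a negative window size A's
-- output (every position a center with an empty context) is a degenerate accident and B's
-- natural slice loop raises IndexError, so those inputs are excluded.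
def Pre_cbow_preprocessing (indices_list : List (List Int)) (window_size : Int) : Prop :=
  0 ≤ window_size

instance (indices_list : List (List Int)) (window_size : Int) :
    Decidable (Pre_cbow_preprocessing indices_list window_size) := by
  unfold Pre_cbow_preprocessing; infer_instance

def pvWitness_cbow_preprocessing : List (List Int) × Int := ([[1, 2, 3, 4, 5], [6, 7]], 2)

def Spec_cbow_preprocessing (indices_list : List (List Int)) (window_size : Int)
    (out : List (List Int) × List Int) : Prop :=
  out = cbow_preprocessing_alt indices_list window_size

instance (indices_list : List (List Int)) (window_size : Int) (out : List (List Int) × List Int) :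
    Decidable (Spec_cbow_preprocessing indices_list window_size out) := by
  unfold Spec_cbow_preprocessing; infer_instance

-- ===== CLAIM (what is proved, stated in full; the proofs are below) =====
def Claim_equal_cbow_preprocessing : Prop :=
  ∀ (indices_list : List (List Int)) (window_size : Int),
    Dom_cbow_preprocessing indices_list window_size →
    Pre_cbow_preprocessing indices_list window_size →
    Spec_cbow_preprocessing indices_list window_size (cbow_preprocessing indices_list window_size)

-- ===== LEMMAS AND PROOFS =====

-- A's loop shape: append-to-both-components under a test = filter-then-map on each component.
theorem pv_foldl_pair_append_if {α β γ : Type} (l : List α) (p : α → Prop) [DecidablePred p]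
    (f : α → β) (g : α → γ) (acc : List β × List γ) :
    l.foldl (fun acc x => if p x then (acc.1 ++ [f x], acc.2 ++ [g x]) else acc) acc
      = (acc.1 ++ (l.filter (fun x => decide (p x))).map f,
         acc.2 ++ (l.filter (fun x => decide (p x))).map g) := by
  induction l generalizing acc with
  | nil => simp
  | cons a t ih =>
    by_cases h : p a
    · simp only [List.foldl_cons, if_pos h, ih, List.filter_cons, decide_eq_true h]
      simp
    · simp only [List.foldl_cons, if_neg h, ih, List.filter_cons, decide_eq_false h]
      simp

-- B's loop shape: unconditional append-to-both-components = map on each component.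
theorem pv_foldl_pair_append {α β γ : Type} (l : List α) (f : α → β) (g : α → γ)
    (acc : List β × List γ) :
    l.foldl (fun acc x => (acc.1 ++ [f x], acc.2 ++ [g x])) acc
      = (acc.1 ++ l.map f, acc.2 ++ l.map g) := by
  induction l generalizing acc with
  | nil => simp
  | cons a t ih => simp [ih]

theorem pv_pyRange_map_add (a b i : Int) :
    (PySem.List.pyRange a b 1).map (fun j => i + j) = PySem.List.pyRange (i + a) (i + b) 1 := by
  rw [PySem.List.pyRange_one a b, PySem.List.pyRange_one (i + a) (i + b)]
  have h : i + b - (i + a) = b - a := by ring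
  rw [h, List.map_map]
  refine List.map_congr_left ?_
  intro k _
  simp only [Function.comp_apply]
  ring

-- A range of in-bounds indices mapped through defaulted indexing is the corresponding slice.
theorem pv_map_pyGetD_eq_slice (xs : List Int) (a b : Int) (ha : 0 ≤ a) (hab : a ≤ b)
    (hb : b ≤ (xs.length : Int)) :
    (PySem.List.pyRange a b 1).map (fun j => PySem.List.pyGetD xs j 0)
      = PySem.List.slice xs (some a) (some b) := by
  rw [PySem.List.slice_of_nonneg xs ha (le_trans ha hab) (le_trans hab hb) hb]
  apply List.ext_getElem
  · simp [PySem.List.length_pyRange_one]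
    omega
  · intro k hk _
    have hk' : (k : Int) < b - a := by
      have := hk; simp [PySem.List.length_pyRange_one] at this; omega
    rw [List.getElem_map, PySem.List.getElem_pyRange_one]
    have h0 : (0:Int) ≤ a + k := by omega
    have h1 : a + (k:Int) < (xs.length : Int) := by omega
    rw [PySem.List.pyGetD_eq_getElem xs 0 h0 h1]
    rw [List.getElem_take, List.getElem_drop]
    congr 1
    omega

-- The filter over range(0, l) picking the valid-center band is exactly range(ws, l - ws).
theorem pv_filter_center (l ws : Int) (hws : 0 ≤ ws) :
    (PySem.List.pyRange 0 l 1).filter (fun j => decide (ws ≤ j ∧ j ≤ l - 1 - ws))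
      = PySem.List.pyRange ws (l - ws) 1 := by
  by_cases hl : ws ≤ l - ws
  · rw [PySem.List.pyRange_one_append 0 ws l hws (by omega),
        PySem.List.pyRange_one_append ws (l - ws) l hl (by omega),
        List.filter_append, List.filter_append]
    rw [List.filter_eq_nil_iff.2 (by intro j hj; rw [PySem.List.mem_pyRange_one] at hj; simp; omega),
        List.filter_eq_self.2 (by intro j hj; rw [PySem.List.mem_pyRange_one] at hj; simp; omega),
        List.filter_eq_nil_iff.2 (by intro j hj; rw [PySem.List.mem_pyRange_one] at hj; simp; omega)]
    simp only [List.append_nil, List.nil_append]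
  · rw [PySem.List.pyRange_one_eq_nil (show l - ws ≤ ws by omega)]
    apply List.filter_eq_nil_iff.2
    intro j hj
    rw [PySem.List.mem_pyRange_one] at hj
    simp
    omega

-- For a valid center i, A's offset-comprehension context equals B's two slices.
theorem pv_ctx_eq (idx : List Int) (ws i : Int) (hws : 0 ≤ ws) (hi1 : ws ≤ i)
    (hi2 : i ≤ (idx.length : Int) - 1 - ws) :
    (((PySem.List.pyRange (-ws) (ws + 1) 1).filter
        (fun j => decide (0 ≤ i + j) && decide (i + j < (idx.length : Int)) && decide (j ≠ 0))).map
        (fun j => i + j)).map (fun k => PySem.List.pyGetD idx k 0)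
      = PySem.List.slice idx (some (i - ws)) (some i) ++
        PySem.List.slice idx (some (i + 1)) (some (i + ws + 1)) := by
  have hcong : ((PySem.List.pyRange (-ws) (ws + 1) 1).filter
      (fun j => decide (0 ≤ i + j) && decide (i + j < (idx.length : Int)) && decide (j ≠ 0)))
      = (PySem.List.pyRange (-ws) (ws + 1) 1).filter (fun j => decide (j ≠ 0)) := by
    apply List.filter_congr
    intro j hj
    rw [PySem.List.mem_pyRange_one] at hj
    have h1 : decide (0 ≤ i + j) = true := by simp; omega
    have h2 : decide (i + j < (idx.length : Int)) = true := by simp; omega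
    rw [h1, h2]
    simp
  rw [hcong]
  have hA : (PySem.List.pyRange (-ws) 0 1).filter (fun j => decide (j ≠ 0))
      = PySem.List.pyRange (-ws) 0 1 :=
    List.filter_eq_self.2 (by
      intro j hj; rw [PySem.List.mem_pyRange_one] at hj; simp; omega)
  have hB : (PySem.List.pyRange 1 (ws + 1) 1).filter (fun j => decide (j ≠ 0))
      = PySem.List.pyRange 1 (ws + 1) 1 :=
    List.filter_eq_self.2 (by
      intro j hj; rw [PySem.List.mem_pyRange_one] at hj; simp; omega)
  have hsplit : (PySem.List.pyRange (-ws) (ws + 1) 1).filter (fun j => decide (j ≠ 0))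
      = PySem.List.pyRange (-ws) 0 1 ++ PySem.List.pyRange 1 (ws + 1) 1 := by
    have h1 : PySem.List.pyRange (-ws) (ws + 1) 1
        = PySem.List.pyRange (-ws) 0 1 ++ PySem.List.pyRange 0 (ws + 1) 1 :=
      PySem.List.pyRange_one_append (-ws) 0 (ws + 1) (by omega) (by omega)
    have h2 : PySem.List.pyRange 0 (ws + 1) 1 = 0 :: PySem.List.pyRange 1 (ws + 1) 1 :=
      PySem.List.pyRange_one_cons (by omega)
    rw [h1, h2, List.filter_append, List.filter_cons, hA, hB]
    simp
  rw [hsplit, List.map_append, List.map_append,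
      pv_pyRange_map_add, pv_pyRange_map_add,
      show i + -ws = i - ws by ring, show i + 0 = i by ring,
      show i + (ws + 1) = i + ws + 1 by ring,
      pv_map_pyGetD_eq_slice idx (i - ws) i (by omega) (by omega) (by omega),
      pv_map_pyGetD_eq_slice idx (i + 1) (i + ws + 1) (by omega) (by omega) (by omega)]

-- Per inner list: A's helper output components = B's per-list map components.
theorem pv_list_eq (idx : List Int) (ws : Int) (hws : 0 ≤ ws) :
    build_current_surrounding_pairs idx ws
      = ((PySem.List.pyRange ws ((idx.length : Int) - ws) 1).map
           (fun i => PySem.List.slice idx (some (i - ws)) (some i) ++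
                     PySem.List.slice idx (some (i + 1)) (some (i + ws + 1))),
         (PySem.List.pyRange ws ((idx.length : Int) - ws) 1).map
           (fun i => PySem.List.pyGetD idx i 0)) := by
  unfold build_current_surrounding_pairs
  rw [pv_foldl_pair_append_if (PySem.List.enumerate idx)
        (fun p => ws ≤ p.1 ∧ p.1 ≤ (idx.length : Int) - 1 - ws)
        (fun p => (((PySem.List.pyRange (-ws) (ws + 1) 1).filter
            (fun j => decide (0 ≤ p.1 + j) && decide (p.1 + j < (idx.length : Int)) && decide (j ≠ 0))).map
            (fun j => p.1 + j)).map (fun k => PySem.List.pyGetD idx k 0))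
        (fun p => p.2)]
  rw [PySem.List.enumerate_eq_map_pyRange idx 0, List.filter_map, List.map_map, List.map_map]
  have hfc : ((fun p : Int × Int => decide (ws ≤ p.1 ∧ p.1 ≤ (idx.length : Int) - 1 - ws)) ∘
      (fun j => (j, PySem.List.pyGetD idx j 0)))
      = fun j => decide (ws ≤ j ∧ j ≤ (idx.length : Int) - 1 - ws) := by
    funext j; rfl
  rw [hfc]
  have hlen : PySem.List.len idx = (idx.length : Int) := rfl
  rw [hlen, pv_filter_center (idx.length : Int) ws hws, Prod.mk.injEq]
  constructor
  · simp only [List.nil_append]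
    refine List.map_congr_left ?_
    intro i hi
    rw [PySem.List.mem_pyRange_one] at hi
    simp only [Function.comp_apply]
    exact pv_ctx_eq idx ws i hws hi.1 (by omega)
  · simp

-- Per inner list, B's inner fold appends the same two maps to the accumulator.
theorem pv_alt_inner (idx : List Int) (ws : Int) (acc : List (List Int) × List Int) :
    (PySem.List.pyRange ws ((idx.length : Int) - ws) 1).foldl
      (fun acc2 i =>
        (acc2.1 ++ [PySem.List.slice idx (some (i - ws)) (some i) ++
                    PySem.List.slice idx (some (i + 1)) (some (i + ws + 1))],
         acc2.2 ++ [PySem.List.pyGetD idx i 0])) acc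
      = (acc.1 ++ (PySem.List.pyRange ws ((idx.length : Int) - ws) 1).map
           (fun i => PySem.List.slice idx (some (i - ws)) (some i) ++
                     PySem.List.slice idx (some (i + 1)) (some (i + ws + 1))),
         acc.2 ++ (PySem.List.pyRange ws ((idx.length : Int) - ws) 1).map
           (fun i => PySem.List.pyGetD idx i 0)) :=
  pv_foldl_pair_append _ _ _ acc

theorem pv_outer (indices_list : List (List Int)) (ws : Int) (hws : 0 ≤ ws)
    (acc : List (List Int) × List Int) :
    indices_list.foldl
      (fun acc idx_list =>
        let r := build_current_surrounding_pairs idx_list ws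
        (acc.1 ++ r.1, acc.2 ++ r.2)) acc
      = indices_list.foldl
        (fun acc idx_list =>
          (PySem.List.pyRange ws ((idx_list.length : Int) - ws) 1).foldl
            (fun acc2 i =>
              (acc2.1 ++ [PySem.List.slice idx_list (some (i - ws)) (some i) ++
                          PySem.List.slice idx_list (some (i + 1)) (some (i + ws + 1))],
               acc2.2 ++ [PySem.List.pyGetD idx_list i 0])) acc) acc := by
  induction indices_list generalizing acc with
  | nil => rfl
  | cons idx t ih =>
    simp only [List.foldl_cons]
    rw [pv_alt_inner, pv_list_eq idx ws hws]
    exact ih _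

-- ===== VERDICT (by name: the statement is the Claim_ definition above) =====
theorem cbow_preprocessing_spec : Claim_equal_cbow_preprocessing := by
  intro indices_list window_size _ hpre
  unfold Spec_cbow_preprocessing cbow_preprocessing cbow_preprocessing_alt
  exact pv_outer indices_list window_size hpre ([], [])
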